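-- pv_equiv track=rewrite | github.com/JakkuSakura/ISDN2400 | src/plans/web.py | get_focus_range
-- ===== SOURCE A (Python) =====
-- def get_focus_range(width, height, results):
--     if len(results) == 0:
--         return 0, 0, width, height
--
--     x_min, y_min = width, height
--     x_max, y_max = 0, 0
--     for xyxy, tag in results:
--         x_min = min(x_min, xyxy[0])
--         y_min = min(y_min, xyxy[1])
--         x_max = max(x_max, xyxy[2])
--         y_max = max(y_max, xyxy[3])
--     return int(x_min), int(y_min), int(x_max), int(y_max)
-- ===== SOURCE B (Python) =====
-- def get_focus_range(width, height, results):
--     if len(results) == 0: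
--         return 0, 0, width, height
--
--     def bbox(rs):
--         # bounding box of a nonempty slice by divide-and-conquer merge
--         if len(rs) == 1:
--             xyxy = rs[0][0]
--             return xyxy[0], xyxy[1], xyxy[2], xyxy[3]
--         mid = len(rs) // 2
--         a = bbox(rs[:mid])
--         b = bbox(rs[mid:])
--         return (min(a[0], b[0]), min(a[1], b[1]),
--                 max(a[2], b[2]), max(a[3], b[3]))
--
--     x0, y0, x1, y1 = bbox(results)
--     return int(min(width, x0)), int(min(height, y0)), int(max(0, x1)), int(max(0, y1))
-- ===== Notes on version B (the rewrite author's own statement) =====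
-- stated objective: alternative
-- what changed: Replaces A's single left-to-right four-accumulator loop with a recursive divide-and-conquer that computes bounding boxes of the two halves and merges them, clamping against the width/height/0 seeds only once at the end.
import Mathlib
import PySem

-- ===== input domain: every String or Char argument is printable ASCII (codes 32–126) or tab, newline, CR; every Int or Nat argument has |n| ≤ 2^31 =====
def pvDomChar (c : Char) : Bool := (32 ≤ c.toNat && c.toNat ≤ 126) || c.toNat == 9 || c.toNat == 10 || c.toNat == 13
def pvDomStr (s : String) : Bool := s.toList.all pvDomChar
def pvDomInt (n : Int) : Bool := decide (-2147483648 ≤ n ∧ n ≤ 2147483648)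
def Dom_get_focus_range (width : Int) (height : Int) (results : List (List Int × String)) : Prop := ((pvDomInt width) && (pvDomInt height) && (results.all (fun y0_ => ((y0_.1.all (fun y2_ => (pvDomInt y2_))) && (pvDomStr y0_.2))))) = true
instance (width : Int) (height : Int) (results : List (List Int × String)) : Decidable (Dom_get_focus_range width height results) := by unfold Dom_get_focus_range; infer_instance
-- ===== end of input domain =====

-- B computes the bounding box by recursive divide-and-conquer (merge the boxes of the two
-- halves), clamping with the width/height/0 seeds once at the end, instead of A's single
-- four-accumulator loop (objective: alternative).

-- ===== PORT A =====
def get_focus_range (width : Int) (height : Int) (results : List (List Int × String)) : Int × Int × Int × Int :=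
  if results.length = 0 then (0, 0, width, height)
  else
    results.foldl
      (fun (s : Int × Int × Int × Int) p =>
        (min s.1 (PySem.List.pyGetD p.1 0 0),
         min s.2.1 (PySem.List.pyGetD p.1 1 0),
         max s.2.2.1 (PySem.List.pyGetD p.1 2 0),
         max s.2.2.2 (PySem.List.pyGetD p.1 3 0)))
      (width, height, 0, 0)

-- ===== PORT B =====
-- merge of two boxes (the min/min/max/max combination Source B writes inline)
def gfrMerge (a b : Int × Int × Int × Int) : Int × Int × Int × Int :=
  (min a.1 b.1, min a.2.1 b.2.1, max a.2.2.1 b.2.2.1, max a.2.2.2 b.2.2.2)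

-- Source B's bbox: divide and conquer on the list; the empty case is unreachable
-- (bbox is only called on nonempty lists) and only makes the recursion total.
def gfrBBox (rs : List (List Int × String)) : Int × Int × Int × Int :=
  if h1 : rs.length = 1 then
    let xyxy := (rs.headD ([], "")).1
    (PySem.List.pyGetD xyxy 0 0, PySem.List.pyGetD xyxy 1 0,
     PySem.List.pyGetD xyxy 2 0, PySem.List.pyGetD xyxy 3 0)
  else if h0 : rs.length = 0 then (0, 0, 0, 0)
  else
    let mid := rs.length / 2
    gfrMerge (gfrBBox (rs.take mid)) (gfrBBox (rs.drop mid))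
termination_by rs.length
decreasing_by
  · simp [List.length_take]; omega
  · simp [List.length_drop]; omega

def get_focus_range_alt (width : Int) (height : Int) (results : List (List Int × String)) : Int × Int × Int × Int :=
  if results.length = 0 then (0, 0, width, height)
  else
    let b := gfrBBox results
    (min width b.1, min height b.2.1, max 0 b.2.2.1, max 0 b.2.2.2)

-- ===== PRECONDITION & SPEC =====
-- Pre_ excludes inputs on which A raises IndexError: a results entry whose box list has fewer than 4 coordinates.
def Pre_get_focus_range (width : Int) (height : Int) (results : List (List Int × String)) : Prop :=
  ∀ p ∈ results, 4 ≤ p.1.length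
instance (width : Int) (height : Int) (results : List (List Int × String)) : Decidable (Pre_get_focus_range width height results) := by unfold Pre_get_focus_range; infer_instance
def pvWitness_get_focus_range : Int × Int × (List (List Int × String)) := (10, 8, [([1, 2, 5, 6], "cat"), ([0, 3, 4, 4], "dog")])
def Spec_get_focus_range (width : Int) (height : Int) (results : List (List Int × String)) (out : Int × Int × Int × Int) : Prop := out = get_focus_range_alt width height results
instance (width : Int) (height : Int) (results : List (List Int × String)) (out : Int × Int × Int × Int) : Decidable (Spec_get_focus_range width height results out) := by unfold Spec_get_focus_range; infer_instance

-- ===== CLAIM (what is proved, stated in full; the proofs are below) =====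
def Claim_equal_get_focus_range : Prop := ∀ (width : Int) (height : Int) (results : List (List Int × String)), Dom_get_focus_range width height results → Pre_get_focus_range width height results → Spec_get_focus_range width height results (get_focus_range width height results)

-- ===== LEMMAS AND PROOFS =====

theorem gfrMerge_assoc (a b c : Int × Int × Int × Int) :
    gfrMerge (gfrMerge a b) c = gfrMerge a (gfrMerge b c) := by
  simp [gfrMerge, min_assoc, max_assoc]

-- A's fold from any seed equals merging the seed with B's divide-and-conquer box.
theorem gfrBBox_foldl : ∀ (n : Nat) (rs : List (List Int × String)), rs.length = n → rs ≠ [] →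
    ∀ s : Int × Int × Int × Int,
    rs.foldl
      (fun (s : Int × Int × Int × Int) p =>
        (min s.1 (PySem.List.pyGetD p.1 0 0),
         min s.2.1 (PySem.List.pyGetD p.1 1 0),
         max s.2.2.1 (PySem.List.pyGetD p.1 2 0),
         max s.2.2.2 (PySem.List.pyGetD p.1 3 0)))
      s
    = gfrMerge s (gfrBBox rs) := by
  intro n
  induction n using Nat.strong_induction_on with
  | _ n ih =>
    intro rs hlen hne s
    match rs, hne with
    | [p], _ =>
      rw [gfrBBox]
      simp only [List.foldl_cons, List.foldl_nil, List.length_cons, List.length_nil,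
        List.headD_cons, gfrMerge]
      rfl
    | p :: q :: rest, _ =>
      rw [gfrBBox]
      have h1 : ¬ (p :: q :: rest).length = 1 := by simp
      have h0 : ¬ (p :: q :: rest).length = 0 := by simp
      simp only [h1, h0]
      set rs := p :: q :: rest with hrs
      set mid := rs.length / 2 with hmid
      have hmid1 : 1 ≤ mid := by simp [hmid, hrs]; omega
      have hmidlt : mid < rs.length := by
        have : 2 ≤ rs.length := by simp [hrs]
        omega
      have hsplit : rs = rs.take mid ++ rs.drop mid := (List.take_append_drop mid rs).symm
      have hlt : (rs.take mid).length = mid := by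
        simp [List.length_take]; omega
      have hld : (rs.drop mid).length = rs.length - mid := by simp
      have htne : rs.take mid ≠ [] := by
        intro h; rw [h] at hlt; simp at hlt; omega
      have hdne : rs.drop mid ≠ [] := by
        intro h; rw [h] at hld; simp at hld; omega
      conv_lhs => rw [hsplit]
      rw [List.foldl_append]
      rw [ih mid (by omega) (rs.take mid) hlt htne s]
      rw [ih (rs.length - mid) (by omega) (rs.drop mid) hld hdne]
      rw [gfrMerge_assoc]
      simp

-- ===== VERDICT (by name: the statement is the Claim_ definition above) =====
theorem get_focus_range_spec : Claim_equal_get_focus_range := by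
  intro width height results _ _
  unfold Spec_get_focus_range get_focus_range get_focus_range_alt
  by_cases h : results.length = 0
  · simp [h]
  · simp only [h]
    have hne : results ≠ [] := by
      intro he; rw [he] at h; simp at h
    rw [gfrBBox_foldl results.length results rfl hne (width, height, 0, 0)]
    rfl
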